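-- pv_equiv track=rewrite | github.com/HoangDung05/PTIT | python/codePtit/PY01024_Chan_le.py | check
-- ===== SOURCE A (Python) =====
-- def check(n):
--     sum = 0
--     length = len(str(n))
--     n = str(n)
--     for i in range(length):
--         sum += int(n[i])
--         if i == length - 1:
--             break
--         if abs(int(n[i]) - int(n[i + 1])) != 2:
--             return False
--     if sum % 10 != 0:
--         return False
--     return True
-- ===== SOURCE B (Python) =====
-- def check(n):
--     ok = True
--     s = n % 10
--     while n >= 10:
--         ok = ok and abs(n % 10 - n // 10 % 10) == 2
--         n //= 10
--         s += n % 10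
--     return ok and s % 10 == 0
-- ===== Notes on version B (the rewrite author's own statement) =====
-- stated objective: alternative
-- what changed: B never converts the number to a string: it extracts digits arithmetically (n % 10, n // 10) in a least-significant-first while loop, whereas A iterates over the characters of str(n) most-significant-first with indexed lookahead.
-- outside the precondition, e.g. on check(-1): A raises ValueError, B returns False
import Mathlib
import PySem

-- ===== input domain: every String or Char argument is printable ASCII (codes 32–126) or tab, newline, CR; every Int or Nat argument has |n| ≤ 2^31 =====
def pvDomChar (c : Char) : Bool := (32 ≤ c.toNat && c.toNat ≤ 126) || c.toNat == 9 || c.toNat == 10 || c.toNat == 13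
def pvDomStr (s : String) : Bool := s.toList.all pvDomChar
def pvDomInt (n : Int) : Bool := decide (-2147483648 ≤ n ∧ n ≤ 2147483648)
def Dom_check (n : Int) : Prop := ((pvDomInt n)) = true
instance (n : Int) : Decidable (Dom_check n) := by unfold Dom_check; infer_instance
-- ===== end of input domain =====

-- B extracts digits arithmetically (n % 10 / n // 10, least-significant first) instead of
-- A's scan over the characters of str(n); objective: alternative algorithm, same cost.

-- ===== PORT A =====
-- int(c) for one char: none = Python ValueError (only reachable for the '-' of a negative n,
-- excluded by Pre_); the getD 0 fallback is only taken outside Pre_check.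
def digitInt (c : Char) : Int := (PySem.Int.ofStr? (String.ofList [c])).getD 0

-- A's loop: i runs over the digits, sum += digit, break at the last index, early False on a bad diff
def checkGo : List Char → Int → Bool
  | [], sum => PySem.Int.mod sum 10 == 0
  | [c], sum => PySem.Int.mod (sum + digitInt c) 10 == 0
  | c :: d :: rest, sum =>
      if (digitInt c - digitInt d).natAbs ≠ 2 then false
      else checkGo (d :: rest) (sum + digitInt c)

def check (n : Int) : Bool := checkGo (PySem.Int.toStr n).toList 0

-- ===== PORT B =====
-- B's while loop: ok = ok and |n%10 - n//10%10| == 2; n //= 10; s += n%10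
def altGo (n : Int) (ok : Bool) (s : Int) : Bool :=
  if 10 ≤ n then
    altGo (PySem.Int.floordiv n 10)
      (ok && ((PySem.Int.mod n 10 - PySem.Int.mod (PySem.Int.floordiv n 10) 10).natAbs == 2))
      (s + PySem.Int.mod (PySem.Int.floordiv n 10) 10)
  else ok && (PySem.Int.mod s 10 == 0)
termination_by n.toNat
decreasing_by
  rw [PySem.Int.floordiv_eq_ediv_of_pos (by omega : (0:Int) < 10)]
  omega

def check_alt (n : Int) : Bool := altGo n true (PySem.Int.mod n 10)

-- ===== PRECONDITION & SPEC =====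
-- Pre_ excludes negative n: there str(n) starts with '-' and int('-') raises ValueError in A.
def Pre_check (n : Int) : Prop := 0 ≤ n
instance (n : Int) : Decidable (Pre_check n) := by unfold Pre_check; infer_instance
def pvWitness_check : Int := 2420
def Spec_check (n : Int) (out : Bool) : Prop := out = check_alt n
instance (n : Int) (out : Bool) : Decidable (Spec_check n out) := by unfold Spec_check; infer_instance

-- ===== CLAIM (what is proved, stated in full; the proofs are below) =====
def Claim_equal_check : Prop := ∀ (n : Int), Dom_check n → Pre_check n → Spec_check n (check n)

-- ===== LEMMAS AND PROOFS =====

-- the digit characters of m, most significant first (what Nat.toDigits 10 computes)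
def digChars (m : Nat) : List Char :=
  if m < 10 then [Nat.digitChar m] else digChars (m / 10) ++ [Nat.digitChar (m % 10)]
decreasing_by omega

-- the digit values of m, most significant first
def digitsMSB (m : Nat) : List Int :=
  if m < 10 then [(m : Int)] else digitsMSB (m / 10) ++ [((m % 10 : Nat) : Int)]
decreasing_by omega

def adjAll (l : List Int) : Bool := (l.zip l.tail).all fun p => (p.1 - p.2).natAbs == 2

theorem toDigitsCore_eq : ∀ (f n : Nat) (acc : List Char), n < f →
    Nat.toDigitsCore 10 f n acc = digChars n ++ acc := by
  intro f
  induction f with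
  | zero => omega
  | succ f ih =>
    intro n acc h
    by_cases h10 : n < 10
    · have hq : n / 10 = 0 := by omega
      rw [digChars]
      simp [Nat.toDigitsCore, hq, h10, Nat.mod_eq_of_lt h10]
    · have hq : ¬ n / 10 = 0 := by omega
      rw [digChars]
      simp only [Nat.toDigitsCore, hq, h10, if_false]
      rw [ih (n / 10) _ (by omega), List.append_assoc]
      simp

theorem toDigits_eq (m : Nat) : Nat.toDigits 10 m = digChars m := by
  have := toDigitsCore_eq (m + 1) m [] (by omega)
  simpa [Nat.toDigits] using this

theorem digitInt_digitChar (d : Nat) (h : d < 10) : digitInt (Nat.digitChar d) = (d : Int) := by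
  interval_cases d <;> decide

theorem map_digChars (m : Nat) : (digChars m).map digitInt = digitsMSB m := by
  induction m using Nat.strong_induction_on with
  | _ m ih =>
    rw [digChars, digitsMSB]
    by_cases h : m < 10
    · simp [h, digitInt_digitChar m h]
    · simp only [h, if_false, List.map_append, List.map]
      rw [ih (m / 10) (by omega), digitInt_digitChar (m % 10) (by omega)]

theorem digitsMSB_ne_nil (m : Nat) : digitsMSB m ≠ [] := by
  rw [digitsMSB]; split <;> simp

theorem digitsMSB_decomp (m : Nat) :
    digitsMSB m = (digitsMSB m).dropLast ++ [((m % 10 : Nat) : Int)] := by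
  by_cases h : m < 10
  · rw [digitsMSB]
    simp [h, Nat.mod_eq_of_lt h]
  · conv_lhs => rw [digitsMSB]
    conv_rhs => rw [digitsMSB]
    simp [h]

theorem digitsMSB_getLast (m : Nat) (h : digitsMSB m ≠ []) :
    (digitsMSB m).getLast h = ((m % 10 : Nat) : Int) := by
  have h1 : (digitsMSB m).getLast? = some ((m % 10 : Nat) : Int) := by
    conv_lhs => rw [digitsMSB_decomp m]
    simp
  rw [List.getLast?_eq_some_getLast (h := h)] at h1
  exact Option.some.inj h1

theorem digitsMSB_sum (m : Nat) :
    (digitsMSB m).sum = (digitsMSB m).dropLast.sum + ((m % 10 : Nat) : Int) := by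
  conv_lhs => rw [digitsMSB_decomp m]
  simp

theorem div10_natCast (k : Nat) :
    PySem.Int.floordiv ((k : Nat) : Int) 10 = ((k / 10 : Nat) : Int) := by
  rw [PySem.Int.floordiv_eq_ediv_of_pos (by norm_num)]
  omega

theorem mod10_natCast (k : Nat) :
    PySem.Int.mod ((k : Nat) : Int) 10 = ((k % 10 : Nat) : Int) := by
  rw [PySem.Int.mod_eq_emod_of_pos (by norm_num)]
  omega

theorem adjAll_append (l : List Int) (hl : l ≠ []) (d : Int) :
    adjAll (l ++ [d]) = (adjAll l && ((l.getLast hl - d).natAbs == 2)) := by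
  induction l with
  | nil => simp at hl
  | cons a t ih =>
    cases t with
    | nil => simp [adjAll]
    | cons b r =>
      have ht : (b :: r : List Int) ≠ [] := by simp
      simp only [adjAll, List.cons_append, List.zip, List.tail, List.zipWith, List.all_cons] at *
      rw [ih ht]
      simp [List.getLast, Bool.and_assoc]

-- A's result, characterised over the digit list
theorem checkGo_eq (l : List Char) (s : Int) :
    checkGo l s =
      (adjAll (l.map digitInt)
        && (PySem.Int.mod ((l.map digitInt).foldl (· + ·) s) 10 == 0)) := by
  induction l generalizing s with
  | nil => simp [checkGo, adjAll]
  | cons c t ih =>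
    cases t with
    | nil => simp [checkGo, adjAll]
    | cons d r =>
      simp only [checkGo, adjAll, List.map, List.tail, List.zip, List.zipWith, List.all_cons,
        List.foldl]
      split_ifs with h
      · simp [h]
      · rw [ih]
        have : (digitInt c - digitInt d).natAbs = 2 := by omega
        simp [adjAll, this, List.zip]

theorem foldl_add_sum (l : List Int) (s : Int) : l.foldl (· + ·) s = s + l.sum := by
  induction l generalizing s with
  | nil => simp
  | cons a t ih => simp [List.foldl, ih, add_assoc]

-- B's loop, characterised over the digit list
theorem altGo_eq (m : Nat) : ∀ (ok : Bool) (s : Int),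
    altGo (m : Int) ok s =
      ((ok && adjAll (digitsMSB m))
        && (PySem.Int.mod (s + (digitsMSB m).dropLast.sum) 10 == 0)) := by
  induction m using Nat.strong_induction_on with
  | _ m ih =>
    intro ok s
    rw [altGo, digitsMSB]
    by_cases h : m < 10
    · have h' : ¬ (10 : Int) ≤ (m : Int) := by exact_mod_cast (by omega : ¬ (10:Nat) ≤ m)
      simp [h', h, adjAll]
    · have h' : (10 : Int) ≤ (m : Int) := by exact_mod_cast (by omega : (10:Nat) ≤ m)
      rw [if_pos h', if_neg h, div10_natCast m, mod10_natCast m, mod10_natCast (m / 10)]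
      rw [ih (m / 10) (by omega)]
      have hne := digitsMSB_ne_nil (m / 10)
      rw [adjAll_append _ hne, digitsMSB_getLast _ hne, List.dropLast_concat]
      have hsum : s + ((m / 10 % 10 : Nat) : Int) + (digitsMSB (m / 10)).dropLast.sum
          = s + (digitsMSB (m / 10)).sum := by
        rw [digitsMSB_sum (m / 10)]; ring
      rw [hsum]
      have habs : ((((m % 10 : Nat) : Int)) - ((m / 10 % 10 : Nat) : Int)).natAbs
          = ((((m / 10 % 10 : Nat) : Int)) - ((m % 10 : Nat) : Int)).natAbs := by
        omega
      rw [habs]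
      simp [Bool.and_assoc, Bool.and_comm]

-- ===== VERDICT (by name: the statement is the Claim_ definition above) =====
theorem check_spec : Claim_equal_check := by
  intro n _ hpre
  have h0 : (0 : Int) ≤ n := hpre
  unfold Spec_check check check_alt
  have hn : n = ((n.toNat : Nat) : Int) := by omega
  rw [hn]
  have hchars : (PySem.Int.toStr ((n.toNat : Nat) : Int)).toList = digChars n.toNat := by
    rw [PySem.Int.toList_toStr]
    simp only [PySem.Int.toChars]
    rw [if_neg (by omega), toDigits_eq]
    congr 1
  rw [checkGo_eq, hchars, map_digChars, altGo_eq, mod10_natCast, foldl_add_sum]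
  rw [digitsMSB_sum]
  simp [add_comm]
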